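-- pv_equiv track=rewrite | github.com/ksato007/bedrock-code-gen | code_gen/virtual_env_manager.py | find_error_message
-- ===== SOURCE A (Python) =====
-- def find_error_message(message: str):
--     """
--     Extracts the error message from the given string.
--
--     Args:
--         message (str): The string to search for an error message.
--
--     Returns:
--         str: The extracted error message, or None if no error message is found.
--     """
--     lines = message.split('\n')
--     error_patterns = ['Error:', 'Exception:']
--     for pattern in error_patterns:
--         for line in message.split('\n'):
--             if pattern in line:
--                 return line.strip()
--     return None
-- ===== SOURCE B (Python) =====
-- def find_error_message(message: str):
--     """Single pass: remember the first 'Error:' line and first 'Exception:' line."""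
--     error_line = None
--     exc_line = None
--     for line in message.split('\n'):
--         if error_line is None and 'Error:' in line:
--             error_line = line
--         if exc_line is None and 'Exception:' in line:
--             exc_line = line
--     if error_line is not None:
--         return error_line.strip()
--     if exc_line is not None:
--         return exc_line.strip()
--     return None
-- ===== Notes on version B (the rewrite author's own statement) =====
-- stated objective: simpler
-- what changed: Replaced A's per-pattern rescans of the line list with a single traversal that memoizes the first matching line for each of the two patterns, then applies the pattern priority once at the end.
import Mathlib
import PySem

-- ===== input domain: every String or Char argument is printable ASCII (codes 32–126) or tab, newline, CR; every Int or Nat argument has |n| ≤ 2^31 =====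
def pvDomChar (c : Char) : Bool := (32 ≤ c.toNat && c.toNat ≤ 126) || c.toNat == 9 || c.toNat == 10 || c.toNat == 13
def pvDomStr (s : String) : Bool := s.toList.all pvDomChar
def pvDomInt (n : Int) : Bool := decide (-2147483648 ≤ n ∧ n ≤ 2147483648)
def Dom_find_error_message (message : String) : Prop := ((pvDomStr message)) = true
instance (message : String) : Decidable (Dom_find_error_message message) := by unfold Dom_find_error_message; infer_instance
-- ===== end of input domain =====

-- B collapses A's two per-pattern rescans into one traversal memoizing the first matching line per pattern (simpler).

-- ===== PORT A =====
-- inner loop: `for line in message.split('\n'): if pattern in line: return line.strip()`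
def pvInnerA (pattern : String) : List String → Option String
  | [] => none
  | l :: ls =>
    if PySem.Str.isIn pattern l then some (PySem.Str.strip l) else pvInnerA pattern ls

-- outer loop over error_patterns with early return
def pvOuterA (lines : List String) : List String → Option String
  | [] => none
  | p :: ps =>
    match pvInnerA p lines with
    | some r => some r
    | none => pvOuterA lines ps

def find_error_message (message : String) : Option String :=
  let lines := ((PySem.Str.split? message "\n").getD [])
  pvOuterA lines ["Error:", "Exception:"]

-- ===== PORT B =====
-- one pass: keep the first line containing 'Error:' and the first containing 'Exception:'
def pvStepB (st : Option String × Option String) (line : String) : Option String × Option String :=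
  let e := match st.1 with
    | none => if PySem.Str.isIn "Error:" line then some line else none
    | some v => some v
  let x := match st.2 with
    | none => if PySem.Str.isIn "Exception:" line then some line else none
    | some v => some v
  (e, x)

def find_error_message_alt (message : String) : Option String :=
  let st := (((PySem.Str.split? message "\n").getD [])).foldl pvStepB (none, none)
  match st.1 with
  | some l => some (PySem.Str.strip l)
  | none =>
    match st.2 with
    | some l => some (PySem.Str.strip l)
    | none => none

-- ===== PRECONDITION & SPEC =====
def Spec_find_error_message (message : String) (out : Option String) : Prop := out = find_error_message_alt message
instance (message : String) (out : Option String) : Decidable (Spec_find_error_message message out) := by unfold Spec_find_error_message; infer_instance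

-- ===== CLAIM (what is proved, stated in full; the proofs are below) =====
def Claim_equal_find_error_message : Prop := ∀ (message : String), Dom_find_error_message message → Spec_find_error_message message (find_error_message message)

-- ===== LEMMAS AND PROOFS =====

-- A's inner loop is find? followed by strip
theorem pvInnerA_eq_find? (p : String) (ls : List String) :
    pvInnerA p ls = (ls.find? (fun l => PySem.Str.isIn p l)).map PySem.Str.strip := by
  induction ls with
  | nil => rfl
  | cons l ls ih =>
    cases h : PySem.Chars.isIn p.toList l.toList <;>
      simp [pvInnerA, List.find?, PySem.Str.isIn, h, ih]

-- B's fold computes the first match of each pattern independently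
theorem pvFoldB_eq (ls : List String) (a b : Option String) :
    ls.foldl pvStepB (a, b) =
      ((a.or (ls.find? (fun l => PySem.Str.isIn "Error:" l))),
       (b.or (ls.find? (fun l => PySem.Str.isIn "Exception:" l)))) := by
  induction ls generalizing a b with
  | nil => simp
  | cons l ls ih =>
    rw [List.foldl_cons, ih]
    cases h1 : PySem.Str.isIn "Error:" l <;>
      cases h2 : PySem.Str.isIn "Exception:" l <;>
      cases a <;> cases b <;>
      simp only [pvStepB, List.find?_cons, h1, h2] <;>
      simp

-- ===== VERDICT (by name: the statement is the Claim_ definition above) =====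
theorem find_error_message_spec : Claim_equal_find_error_message := by
  intro message _
  unfold Spec_find_error_message find_error_message find_error_message_alt
  rw [pvFoldB_eq]
  simp only [pvOuterA, pvInnerA_eq_find?, Option.or, Option.map]
  cases (((PySem.Str.split? message "\n").getD [])).find? (fun l => PySem.Str.isIn "Error:" l) <;>
    cases (((PySem.Str.split? message "\n").getD [])).find? (fun l => PySem.Str.isIn "Exception:" l) <;> rfl
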